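-- pv_equiv track=rewrite | github.com/bhagirath77/hackerrank-algorithm-solutions-python | Solutions/problem solving/Two Characters.py | grt
-- ===== SOURCE A (Python) =====
-- def grt(s,lis):
--     lo=[]
--     for i in s:
--         if i in lis:
--             lo.append(i)
--     y=0
--     for i in range(len(lo)-1):
--         if(lo[i]==lo[i+1]):
--             y=1
--             break
--     if(y==0):
--         return len(lo)
--     else:
--         return 0
-- ===== SOURCE B (Python) =====
-- def grt(s, lis):
--     count = 0
--     prev = None
--     for ch in s:
--         if ch in lis:
--             if ch == prev:
--                 return 0
--             count += 1
--             prev = ch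
--     return count
-- ===== Notes on version B (the rewrite author's own statement) =====
-- stated objective: simpler
-- what changed: Single pass with a last-kept-character state and early return 0, instead of materializing the filtered list and then index-scanning it for adjacent equal pairs.
import Mathlib
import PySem

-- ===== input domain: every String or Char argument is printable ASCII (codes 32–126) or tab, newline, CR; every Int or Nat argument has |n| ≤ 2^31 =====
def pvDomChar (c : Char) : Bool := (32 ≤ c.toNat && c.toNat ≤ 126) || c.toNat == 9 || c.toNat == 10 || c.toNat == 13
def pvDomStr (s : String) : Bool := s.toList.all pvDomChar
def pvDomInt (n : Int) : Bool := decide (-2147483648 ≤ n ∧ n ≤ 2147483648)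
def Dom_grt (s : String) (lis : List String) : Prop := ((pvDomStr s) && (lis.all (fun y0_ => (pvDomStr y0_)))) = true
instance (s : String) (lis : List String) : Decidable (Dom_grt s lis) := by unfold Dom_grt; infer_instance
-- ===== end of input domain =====

-- B filter-then-scan replaced by a single pass with a last-kept-character state (objective: simpler).

-- ===== PORT A =====
-- the second loop of A: for i in range(len(lo)-1): if lo[i]==lo[i+1]: y=1; break  (y returned)
def grtYLoop (lo : List Char) (i : Nat) : Int :=
  if h : i + 1 < lo.length then
    if lo[i] = lo[i + 1] then 1 else grtYLoop lo (i + 1)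
  else 0
termination_by lo.length - i

def grt (s : String) (lis : List String) : Int :=
  let lo := s.toList.foldl (fun acc c => if String.mk [c] ∈ lis then acc ++ [c] else acc) []
  let y := grtYLoop lo 0
  if y = 0 then (lo.length : Int) else 0

-- ===== PORT B =====
-- single pass: count of kept chars, prev = last kept char; early return 0 on adjacent duplicate
def grtAltGo (cs : List Char) (lis : List String) (prev : Option Char) (count : Int) : Int :=
  match cs with
  | [] => count
  | c :: rest =>
    if String.mk [c] ∈ lis then
      if some c = prev then 0
      else grtAltGo rest lis (some c) (count + 1)
    else grtAltGo rest lis prev count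

def grt_alt (s : String) (lis : List String) : Int :=
  grtAltGo s.toList lis none 0

-- ===== PRECONDITION & SPEC =====
def Spec_grt (s : String) (lis : List String) (out : Int) : Prop := out = grt_alt s lis
instance (s : String) (lis : List String) (out : Int) : Decidable (Spec_grt s lis out) := by unfold Spec_grt; infer_instance

-- ===== CLAIM (what is proved, stated in full; the proofs are below) =====
def Claim_equal_grt : Prop := ∀ (s : String) (lis : List String), Dom_grt s lis → Spec_grt s lis (grt s lis)

-- ===== LEMMAS AND PROOFS =====

-- structural "has an adjacent equal pair, possibly against prev" predicate
def pvBad (prev : Option Char) : List Char → Bool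
  | [] => false
  | c :: t => some c = prev || pvBad (some c) t

-- B's inner recursion over the already-filtered list
lemma grtAltGo_filter (cs : List Char) (lis : List String) (prev : Option Char) (count : Int) :
    grtAltGo cs lis prev count =
      (if pvBad prev (cs.filter (fun c => String.mk [c] ∈ lis)) then 0
       else count + ((cs.filter (fun c => String.mk [c] ∈ lis)).length : Int)) := by
  induction cs generalizing prev count with
  | nil => simp [grtAltGo, pvBad]
  | cons c rest ih =>
    by_cases hm : String.mk [c] ∈ lis
    · by_cases hp : some c = prev
      · simp [grtAltGo, hm, hp, pvBad, List.filter]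
      · simp only [grtAltGo, if_neg hp, ih, List.filter_cons, hm]
        simp [pvBad, hp]
        split_ifs
        · rfl
        · push_cast
          ring
    · simp [grtAltGo, hm, ih]

-- A's index loop from position i checks exactly the adjacent pairs of (lo.drop i)
lemma grtYLoop_eq_pvBad (lo : List Char) (i : Nat) :
    grtYLoop lo i = (if pvBad none (lo.drop i) then 1 else 0) := by
  induction i using grtYLoop.induct (lo := lo) with
  | case1 i h hc =>
    rw [grtYLoop, dif_pos h, if_pos hc]
    have hd : lo.drop i = lo[i] :: lo[i + 1] :: lo.drop (i + 2) := by
      rw [List.drop_eq_getElem_cons (by omega), List.drop_eq_getElem_cons h]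
    rw [hd]
    simp [pvBad, hc]
  | case2 i h hc ih =>
    rw [grtYLoop, dif_pos h, if_neg hc, ih]
    have hd : lo.drop i = lo[i] :: lo[i + 1] :: lo.drop (i + 2) := by
      rw [List.drop_eq_getElem_cons (by omega), List.drop_eq_getElem_cons h]
    have hd' : lo.drop (i + 1) = lo[i + 1] :: lo.drop (i + 2) := by
      rw [List.drop_eq_getElem_cons h]
    rw [hd, hd']
    have hne : ¬ lo[i + 1] = lo[i] := fun h' => hc h'.symm
    simp [pvBad, hne]
  | case3 i h =>
    rw [grtYLoop, dif_neg h]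
    have : lo.drop i = [] ∨ ∃ a, lo.drop i = [a] := by
      rcases hd : lo.drop i with _ | ⟨a, _ | ⟨b, t⟩⟩
      · exact Or.inl rfl
      · exact Or.inr ⟨a, rfl⟩
      · exfalso
        have := congrArg List.length hd
        simp [List.length_drop] at this
        omega
    rcases this with h1 | ⟨a, h1⟩ <;> simp [h1, pvBad]

-- A's first loop builds exactly the filter
lemma foldl_filter (cs : List Char) (lis : List String) :
    cs.foldl (fun acc c => if String.mk [c] ∈ lis then acc ++ [c] else acc) [] =
      cs.filter (fun c => String.mk [c] ∈ lis) := by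
  simpa using PySem.List.foldl_append_if_eq_filter
    (p := fun c => decide (String.mk [c] ∈ lis)) (l := cs) (acc := [])

-- ===== VERDICT (by name: the statement is the Claim_ definition above) =====
theorem grt_spec : Claim_equal_grt := by
  intro s lis _
  unfold Spec_grt grt_alt
  simp only [grt]
  rw [foldl_filter, grtAltGo_filter, grtYLoop_eq_pvBad]
  simp only [List.drop_zero]
  split_ifs <;> simp_all
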